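-- pv_equiv track=rewrite | github.com/GNakayama/codility | src/python/lesson99/exercise1.py | solution
-- ===== SOURCE A (Python) =====
-- def solution(S):
--     N = len(S)
--     result = N//2
--
--     if N%2 == 0:
--         return -1
--
--     front = 0
--     back = N - 1
--
--     while front < back:
--         if not S[front] == S[back]:
--             return -1
--
--         front += 1
--         back -= 1
--
--     return result
-- ===== SOURCE B (Python) =====
-- def solution(S):
--     N = len(S)
--     if N % 2 == 0:
--         return -1
--     return N // 2 if S == S[::-1] else -1
-- ===== Notes on version B (the rewrite author's own statement) =====
-- stated objective: idiomatic
-- what changed: Replaces the explicit two-pointer front/back while-loop with an early even-length return plus a single bulk reversal-and-compare (S == S[::-1]).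
import Mathlib
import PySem

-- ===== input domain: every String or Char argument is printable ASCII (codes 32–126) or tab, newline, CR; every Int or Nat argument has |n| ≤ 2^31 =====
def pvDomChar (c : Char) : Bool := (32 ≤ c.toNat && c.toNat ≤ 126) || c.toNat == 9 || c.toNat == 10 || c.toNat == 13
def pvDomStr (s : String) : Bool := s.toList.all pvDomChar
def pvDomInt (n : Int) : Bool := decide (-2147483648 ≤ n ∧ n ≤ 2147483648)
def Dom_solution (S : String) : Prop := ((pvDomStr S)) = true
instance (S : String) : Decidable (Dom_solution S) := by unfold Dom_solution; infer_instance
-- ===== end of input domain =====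

-- B replaces A's two-pointer front/back loop by an even-length early return plus one bulk reversal-and-compare (idiomatic).

-- ===== PORT A =====
-- the while-loop; indices front/back are always in range when called (0 ≤ front ≤ back ≤ N-1), so getD is exact
def pvLoopA (cs : List Char) (front back : Nat) (result : Int) : Int :=
  if front < back then
    if cs.getD front ' ' = cs.getD back ' ' then
      pvLoopA cs (front + 1) (back - 1) result
    else -1
  else result
termination_by back - front
decreasing_by omega

def solution (S : String) : Int :=
  let cs := S.toList
  let N := cs.length
  let result : Int := ((N / 2 : Nat) : Int)   -- N//2 with N ≥ 0
  if N % 2 == 0 then -1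
  else pvLoopA cs 0 (N - 1) result

-- ===== PORT B =====
def solution_alt (S : String) : Int :=
  let cs := S.toList
  let N := cs.length
  if N % 2 == 0 then -1
  else if cs = cs.reverse then ((N / 2 : Nat) : Int) else -1

-- ===== PRECONDITION & SPEC =====
def Spec_solution (S : String) (out : Int) : Prop := out = solution_alt S
instance (S : String) (out : Int) : Decidable (Spec_solution S out) := by unfold Spec_solution; infer_instance

-- ===== CLAIM (what is proved, stated in full; the proofs are below) =====
def Claim_equal_solution : Prop := ∀ (S : String), Dom_solution S → Spec_solution S (solution S)

-- ===== LEMMAS AND PROOFS =====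

-- the two-pointer loop checks exactly the pairwise mirror condition on [front, back)
theorem pvLoopA_eq (cs : List Char) (r : Int) :
    ∀ (n front back : Nat), back - front ≤ n →
    pvLoopA cs front back r =
      if ∀ i, front ≤ i → i < back → cs.getD i ' ' = cs.getD (front + back - i) ' '
      then r else -1 := by
  intro n
  induction n with
  | zero =>
    intro front back h
    rw [pvLoopA]
    have hfb : ¬ front < back := by omega
    rw [if_neg hfb, if_pos]
    intro i h1 h2; omega
  | succ n ih =>
    intro front back h
    rw [pvLoopA]
    by_cases hfb : front < back
    · rw [if_pos hfb]
      by_cases hc : cs.getD front ' ' = cs.getD back ' '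
      · rw [if_pos hc, ih (front + 1) (back - 1) (by omega)]
        apply if_congr _ rfl rfl
        constructor
        · -- inner condition plus the matched pair gives the outer condition
          intro Q i h1 h2
          rcases Nat.lt_or_ge i (front + 1) with hi | hi
          · have hif : i = front := by omega
            rw [hif, show front + back - front = back by omega]
            exact hc
          · rcases Nat.lt_or_ge i (back - 1) with hj | hj
            · have := Q i hi hj
              rwa [show front + 1 + (back - 1) - i = front + back - i by omega] at this
            · have hib : i = back - 1 := by omega
              subst hib
              rw [show front + back - (back - 1) = front + 1 by omega]
              by_cases h3 : front + 1 < back - 1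
              · have := Q (front + 1) le_rfl h3
                rw [show front + 1 + (back - 1) - (front + 1) = back - 1 by omega] at this
                exact this.symm
              · have : front + 1 = back - 1 := by omega
                rw [this]
        · -- the outer condition restricts to the inner one
          intro P i h1 h2
          have := P i (by omega) (by omega)
          rwa [show front + back - i = front + 1 + (back - 1) - i by omega] at this
      · rw [if_neg hc, if_neg]
        intro P
        have := P front le_rfl hfb
        rw [show front + back - front = back by omega] at this
        exact hc this
    · rw [if_neg hfb, if_pos]
      intro i h1 h2; omega

-- the mirror condition from 0 to N-1 is exactly "cs equals its reverse"
theorem mirror_iff_reverse (cs : List Char) :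
    (∀ i, 0 ≤ i → i < cs.length - 1 → cs.getD i ' ' = cs.getD (0 + (cs.length - 1) - i) ' ')
      ↔ cs = cs.reverse := by
  have bridge : ∀ (l : List Char) (k : Nat), k < l.length →
      l.reverse.getD k ' ' = l.getD (l.length - 1 - k) ' ' := by
    intro l k hk
    rw [List.getD_eq_getElem _ ' ' (by simpa using hk), List.getD_eq_getElem _ ' ' (by omega)]
    simp [List.getElem_reverse]
  constructor
  · intro C
    apply List.ext_getElem?
    intro i
    by_cases h : i < cs.length
    · have h2 : cs.length - 1 - i < cs.length := by omega
      rw [List.getElem?_reverse h, List.getElem?_eq_getElem h, List.getElem?_eq_getElem h2]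
      have goalD : cs.getD i ' ' = cs.getD (cs.length - 1 - i) ' ' := by
        by_cases hi : i < cs.length - 1
        · have := C i (Nat.zero_le _) hi
          rwa [show 0 + (cs.length - 1) - i = cs.length - 1 - i by omega] at this
        · have hi' : i = cs.length - 1 := by omega
          subst hi'
          by_cases h0 : 0 < cs.length - 1
          · have := C 0 le_rfl h0
            rw [show 0 + (cs.length - 1) - 0 = cs.length - 1 by omega] at this
            rw [show cs.length - 1 - (cs.length - 1) = 0 by omega]
            exact this.symm
          · rw [show cs.length - 1 - (cs.length - 1) = 0 by omega,
              show cs.length - 1 = 0 by omega]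
      rw [List.getD_eq_getElem _ ' ' h, List.getD_eq_getElem _ ' ' h2] at goalD
      exact congrArg some goalD
    · rw [List.getElem?_eq_none (by omega), List.getElem?_eq_none (by simp; omega)]
  · intro E i _ hi
    rw [show 0 + (cs.length - 1) - i = cs.length - 1 - i by omega]
    calc cs.getD i ' '
        = cs.reverse.getD i ' ' := by conv_lhs => rw [E]
      _ = cs.getD (cs.length - 1 - i) ' ' := bridge cs i (by omega)

-- ===== VERDICT (by name: the statement is the Claim_ definition above) =====
theorem solution_spec : Claim_equal_solution := by
  intro S _
  unfold Spec_solution solution solution_alt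
  simp only []
  by_cases hN : S.toList.length % 2 == 0
  · rw [if_pos hN, if_pos hN]
  · rw [if_neg hN, if_neg hN,
      pvLoopA_eq S.toList _ (S.toList.length - 1) 0 (S.toList.length - 1) le_rfl]
    apply if_congr (mirror_iff_reverse S.toList) rfl rfl
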